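-- pv_equiv track=rewrite | github.com/marmotmarsh/euler-project | src/completed/python/euler0036.py | doubleBasePalindromes
-- ===== SOURCE A (Python) =====
-- def toBinary(number):
--     if number == 1:
--         return "1"
--     return toBinary(number // 2) + str(number % 2)
--
-- def reverse(string):
--     if len(string) == 1:
--         return string
--     return string[-1] + reverse(string[:-1])
--
-- def doubleBasePalindromes(bound):
--     palindromeSum = 0
--
--     for number in range(1, bound):
--         if str(number) == reverse(str(number)):
--             binary = toBinary(number)
--             if binary == reverse(binary):
--                 palindromeSum += number
--
--     return palindromeSum
-- ===== SOURCE B (Python) =====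
-- def _rev(n, base):
--     r = 0
--     while n > 0:
--         r = r * base + n % base
--         n //= base
--     return r
--
-- def doubleBasePalindromes(bound):
--     total = 0
--     for number in range(1, bound):
--         if _rev(number, 10) == number and _rev(number, 2) == number:
--             total += number
--     return total
-- ===== Notes on version B (the rewrite author's own statement) =====
-- stated objective: alternative
-- what changed: B drops all string work: instead of A's recursive character-by-character string reverse and hand-built binary string, B reverses the digits of each number arithmetically in base 10 and in base 2 and compares the reversed value with the number itself.
import Mathlib
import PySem

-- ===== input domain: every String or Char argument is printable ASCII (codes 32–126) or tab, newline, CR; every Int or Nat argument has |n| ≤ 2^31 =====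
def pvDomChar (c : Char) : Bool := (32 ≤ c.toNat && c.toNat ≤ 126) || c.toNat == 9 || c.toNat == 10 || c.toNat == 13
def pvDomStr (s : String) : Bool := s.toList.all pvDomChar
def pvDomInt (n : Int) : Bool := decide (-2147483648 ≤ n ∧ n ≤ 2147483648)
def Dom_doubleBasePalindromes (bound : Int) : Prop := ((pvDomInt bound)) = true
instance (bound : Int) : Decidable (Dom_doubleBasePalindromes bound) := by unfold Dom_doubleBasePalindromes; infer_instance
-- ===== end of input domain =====

-- B replaces A's string-based palindrome tests (recursive string reverse, hand-rolled
-- binary string) by pure integer digit-reversal in each base; alternative algorithm,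
-- measured moderately faster in Python (constant factor).


-- ===== PORT A =====
-- Strings are ported on the List Char side (PYSEM convention); str(number) is PySem.Int.toChars.

-- toBinary(number): 'if number == 1: return "1"; return toBinary(number // 2) + str(number % 2)'.
-- The 'n < 1' branch is a totality guard only: Python recurses forever there, and
-- doubleBasePalindromes only calls it with number ≥ 1.
def toBinaryA (n : Int) : List Char :=
  if n = 1 then ['1']
  else if n < 1 then []   -- unreachable from doubleBasePalindromes (Python would not terminate)
  else toBinaryA (PySem.Int.floordiv n 2) ++ PySem.Int.toChars (PySem.Int.mod n 2)
termination_by n.toNat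
decreasing_by
  have h2 : PySem.Int.floordiv n 2 = n / 2 := PySem.Int.floordiv_eq_ediv_of_pos (by omega)
  simp only [h2]; omega

-- reverse(string): 'if len(string) == 1: return string; return string[-1] + reverse(string[:-1])'.
-- string[-1] is pyGet? l (-1) (none = IndexError on ""; unreachable: callers pass nonempty strings);
-- string[:-1] is dropLast (PySem.List.slice_to_neg_one).
def reverseA (l : List Char) : List Char :=
  if l.length = 1 then l
  else match h : PySem.List.pyGet? l (-1) with
    | none => []   -- "" raises IndexError in Python; unreachable here
    | some c => c :: reverseA l.dropLast
termination_by l.length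
decreasing_by
  have : l ≠ [] := by
    intro he; rw [he] at h; simp [PySem.List.pyGet?] at h
  simp [List.length_dropLast]
  cases l <;> simp_all

def doubleBasePalindromes (bound : Int) : Int :=
  (PySem.List.pyRange 1 bound 1).foldl (fun palindromeSum number =>
    if PySem.Int.toChars number = reverseA (PySem.Int.toChars number) then
      let binary := toBinaryA number
      if binary = reverseA binary then palindromeSum + number else palindromeSum
    else palindromeSum) 0

-- ===== PORT B =====
-- _rev(n, base): the while loop becomes the tail recursion revLoop base n r.
-- The '1 < base' conjunct is a totality guard; B only calls it with base 10 and 2.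
def revLoop (base n r : Int) : Int :=
  if h : 1 < base ∧ 0 < n then
    revLoop base (PySem.Int.floordiv n base) (r * base + PySem.Int.mod n base)
  else r
termination_by n.toNat
decreasing_by
  have hb : PySem.Int.floordiv n base = n / base := PySem.Int.floordiv_eq_ediv_of_pos (by omega)
  rw [hb]
  have : n / base < n := by
    rw [Int.ediv_lt_iff_lt_mul (by omega)]
    nlinarith
  omega

def pyRev (n base : Int) : Int := revLoop base n 0

def doubleBasePalindromes_alt (bound : Int) : Int :=
  (PySem.List.pyRange 1 bound 1).foldl (fun total number =>
    if pyRev number 10 = number ∧ pyRev number 2 = number then total + number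
    else total) 0

-- ===== PRECONDITION & SPEC =====
def Spec_doubleBasePalindromes (bound : Int) (out : Int) : Prop := out = doubleBasePalindromes_alt bound
instance (bound : Int) (out : Int) : Decidable (Spec_doubleBasePalindromes bound out) := by unfold Spec_doubleBasePalindromes; infer_instance

-- ===== CLAIM (what is proved, stated in full; the proofs are below) =====
def Claim_equal_doubleBasePalindromes : Prop := ∀ (bound : Int), Dom_doubleBasePalindromes bound → Spec_doubleBasePalindromes bound (doubleBasePalindromes bound)

-- ===== LEMMAS AND PROOFS =====

-- reverse() is List.reverse on nonempty strings
theorem reverseA_eq_reverse (l : List Char) (h : l ≠ []) : reverseA l = l.reverse := by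
  induction hn : l.length using Nat.strong_induction_on generalizing l with
  | _ n ih =>
    subst hn
    by_cases h1 : l.length = 1
    · obtain ⟨c, rfl⟩ := List.length_eq_one_iff.1 h1
      rw [reverseA]; simp
    · have hlen : 1 < l.length := by
        have : 0 < l.length := List.length_pos_iff.2 h
        omega
      have hsome : l.getLast? = some (l.getLast h) := List.getLast?_eq_getLast h
      rw [reverseA, if_neg h1, PySem.List.pyGet?_neg_one, hsome]
      have hd : l.dropLast ≠ [] := by
        intro he
        have := congrArg List.length he
        simp [List.length_dropLast] at this
        omega
      have hrec := ih l.dropLast.length (by simp [List.length_dropLast]; omega) l.dropLast hd rfl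
      simp only [hrec]
      conv_rhs => rw [← List.dropLast_append_getLast h]
      simp

-- Nat.toDigits is the canonical digit list, most significant first, mapped to chars
theorem toDigits_eq_map_digits (b n : Nat) (hb : 1 < b) (hn : 0 < n) :
    Nat.toDigits b n = ((Nat.digits b n).map Nat.digitChar).reverse := by
  induction n using Nat.strong_induction_on with
  | _ n ih =>
    rcases lt_or_ge n b with hlt | hge
    · rw [Nat.toDigits_of_lt_base hlt, Nat.digits_def' hb hn,
        Nat.mod_eq_of_lt hlt, Nat.div_eq_of_lt hlt]
      simp
    · rw [Nat.toDigits_eq_if hb, if_neg (by omega), Nat.digits_def' hb hn]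
      have hpos : 0 < n / b := Nat.div_pos hge (by omega)
      rw [ih (n / b) (Nat.div_lt_self hn (by omega)) hpos]
      simp

-- toBinary() produces the base-2 digit chars, most significant first
theorem toBinaryA_eq (m : Nat) (hm : 0 < m) :
    toBinaryA (m : Int) = ((Nat.digits 2 m).map Nat.digitChar).reverse := by
  induction m using Nat.strong_induction_on with
  | _ m ih =>
    by_cases hm1 : m = 1
    · simp only [hm1, Nat.cast_one]
      rw [toBinaryA]
      decide
    · have hne : (m : Int) ≠ 1 := by exact_mod_cast hm1
      have hnl : ¬ ((m : Int) < 1) := by omega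
      rw [toBinaryA, if_neg hne, if_neg hnl]
      have hfd : PySem.Int.floordiv (m : Int) 2 = ((m / 2 : Nat) : Int) := by
        exact_mod_cast PySem.Int.floordiv_natCast m 2
      have hmd : PySem.Int.mod (m : Int) 2 = ((m % 2 : Nat) : Int) := by
        exact_mod_cast PySem.Int.mod_natCast m 2
      have hhalf : 0 < m / 2 := Nat.div_pos (by omega) (by omega)
      rw [hfd, hmd, ih (m / 2) (Nat.div_lt_self hm (by omega)) hhalf]
      have htc : PySem.Int.toChars ((m % 2 : Nat) : Int) = [(m % 2).digitChar] := by
        simp only [PySem.Int.toChars]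
        rw [if_neg (by omega), Int.toNat_natCast]
        exact Nat.toDigits_of_lt_base (by omega)
      rw [htc, Nat.digits_def' (by norm_num : 1 < 2) hm]
      simp

-- the while loop of _rev computes the reversed-digits value
theorem revLoop_eq (b : Nat) (hb : 1 < b) (m : Nat) (r : Int) :
    revLoop (b : Int) (m : Int) r
      = r * (b : Int) ^ (Nat.digits b m).length + (Nat.ofDigits b (Nat.digits b m).reverse : Nat) := by
  induction m using Nat.strong_induction_on generalizing r with
  | _ m ih =>
    rcases Nat.eq_zero_or_pos m with rfl | hm
    · rw [revLoop, dif_neg (by omega)]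
      simp [Nat.ofDigits]
    · rw [revLoop, dif_pos (by constructor <;> omega)]
      have hfd : PySem.Int.floordiv (m : Int) (b : Int) = ((m / b : Nat) : Int) :=
        PySem.Int.floordiv_natCast m b
      have hmd : PySem.Int.mod (m : Int) (b : Int) = ((m % b : Nat) : Int) :=
        PySem.Int.mod_natCast m b
      rw [hfd, hmd, ih (m / b) (Nat.div_lt_self hm (by omega))]
      rw [Nat.digits_def' hb hm]
      rw [List.reverse_cons, Nat.ofDigits_append]
      simp [Nat.ofDigits]
      push_cast
      ring

-- n equals its base-b digit reversal iff its digit list is a palindrome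
theorem rev_eq_iff_palindrome (b n : Nat) (hb : 1 < b) (hn : 0 < n) :
    Nat.ofDigits b (Nat.digits b n).reverse = n ↔ (Nat.digits b n).reverse = Nat.digits b n := by
  constructor
  · intro h
    by_cases hmod : n % b = 0
    · exfalso
      have hdig : Nat.digits b n = 0 :: Nat.digits b (n / b) := by
        rw [Nat.digits_def' hb hn, hmod]
      have hlt : Nat.ofDigits b (Nat.digits b n).reverse < b ^ (Nat.digits b (n / b)).length := by
        rw [hdig, List.reverse_cons, Nat.ofDigits_append]
        simp
        calc Nat.ofDigits b (Nat.digits b (n / b)).reverse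
            < b ^ (Nat.digits b (n / b)).reverse.length :=
              Nat.ofDigits_lt_base_pow_length hb
                (fun d hd => Nat.digits_lt_base hb (List.mem_reverse.1 hd))
          _ = b ^ (Nat.digits b (n / b)).length := by rw [List.length_reverse]
      have hge : b ^ (Nat.digits b (n / b)).length ≤ n := by
        have := Nat.base_pow_length_digits_le b n hb (by omega)
        rw [hdig] at this
        simp only [List.length_cons, pow_succ] at this
        have hb0 : 0 < b := by omega
        nlinarith [this]
      omega
    · have hlast : ∀ (hne : (Nat.digits b n).reverse ≠ []),
          (Nat.digits b n).reverse.getLast hne ≠ 0 := by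
        intro hne
        have hh : (Nat.digits b n).reverse.getLast? = some (n % b) := by
          rw [List.getLast?_reverse, Nat.digits_def' hb hn]
          simp
        rw [List.getLast?_eq_getLast hne] at hh
        have h2 := Option.some.inj hh
        omega
      have := Nat.digits_ofDigits b hb (Nat.digits b n).reverse
        (fun d hd => Nat.digits_lt_base hb (List.mem_reverse.1 hd)) hlast
      rw [h] at this
      exact this.symm
  · intro h
    rw [h, Nat.ofDigits_digits]

-- digitChar is injective below 10, elementwise on lists
theorem map_digitChar_inj (L1 : List Nat) : ∀ (L2 : List Nat),
    (∀ d ∈ L1, d < 10) → (∀ d ∈ L2, d < 10) →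
    (L1.map Nat.digitChar = L2.map Nat.digitChar ↔ L1 = L2) := by
  induction L1 with
  | nil => intro L2 _ _; cases L2 <;> simp
  | cons a t ih =>
    intro L2 h1 h2
    cases L2 with
    | nil => simp
    | cons a2 t2 =>
      have hinj : ∀ x < 10, ∀ y < 10, Nat.digitChar x = Nat.digitChar y → x = y := by decide
      constructor
      · intro h
        simp only [List.map_cons, List.cons.injEq] at h
        have ha := hinj a (h1 a (by simp)) a2 (h2 a2 (by simp)) h.1
        have ht := (ih t2 (fun d hd => h1 d (List.mem_cons_of_mem _ hd))
          (fun d hd => h2 d (List.mem_cons_of_mem _ hd))).1 h.2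
        simp [ha, ht]
      · intro h; rw [h]

-- a char-digit list is a palindrome iff the underlying digit list is
theorem map_palindrome_iff (L : List Nat) (hL : ∀ d ∈ L, d < 10) :
    ((L.map Nat.digitChar).reverse = L.map Nat.digitChar) ↔ L.reverse = L := by
  rw [← List.map_reverse]
  exact map_digitChar_inj L.reverse L (fun d hd => hL d (List.mem_reverse.1 hd)) hL

-- per-number: A's base-10 string test agrees with B's arithmetic test
theorem dec_cond_iff (number : Int) (h1 : 1 ≤ number) :
    (PySem.Int.toChars number = reverseA (PySem.Int.toChars number))
      ↔ pyRev number 10 = number := by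
  obtain ⟨m, rfl⟩ : ∃ m : Nat, number = (m : Int) := ⟨number.toNat, by omega⟩
  have hm : 0 < m := by exact_mod_cast h1
  have htc : PySem.Int.toChars (m : Int) = ((Nat.digits 10 m).map Nat.digitChar).reverse := by
    simp only [PySem.Int.toChars]
    rw [if_neg (by omega), Int.toNat_natCast]
    exact toDigits_eq_map_digits 10 m (by omega) hm
  have hdg : Nat.digits 10 m ≠ [] := Nat.digits_ne_nil_iff_ne_zero.2 (by omega)
  have hne : PySem.Int.toChars (m : Int) ≠ [] := by
    rw [htc]
    simp only [ne_eq, List.reverse_eq_nil_iff, List.map_eq_nil_iff]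
    exact hdg
  rw [reverseA_eq_reverse _ hne, htc, List.reverse_reverse]
  have hrev : pyRev (m : Int) 10 = (Nat.ofDigits 10 (Nat.digits 10 m).reverse : Nat) := by
    unfold pyRev
    have := revLoop_eq 10 (by omega) m 0
    push_cast at this ⊢
    rw [this]; ring
  rw [hrev]
  have hcast : ((Nat.ofDigits 10 (Nat.digits 10 m).reverse : Nat) : Int) = (m : Int)
      ↔ Nat.ofDigits 10 (Nat.digits 10 m).reverse = m := by exact_mod_cast Iff.rfl
  rw [hcast, rev_eq_iff_palindrome 10 m (by omega) hm,
    ← map_palindrome_iff _ (fun d hd => Nat.digits_lt_base (by omega) hd)]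

-- per-number: A's binary string test agrees with B's arithmetic test
theorem bin_cond_iff (number : Int) (h1 : 1 ≤ number) :
    (toBinaryA number = reverseA (toBinaryA number)) ↔ pyRev number 2 = number := by
  obtain ⟨m, rfl⟩ : ∃ m : Nat, number = (m : Int) := ⟨number.toNat, by omega⟩
  have hm : 0 < m := by exact_mod_cast h1
  have htc := toBinaryA_eq m hm
  have hdg : Nat.digits 2 m ≠ [] := Nat.digits_ne_nil_iff_ne_zero.2 (by omega)
  have hne : toBinaryA (m : Int) ≠ [] := by
    rw [htc]
    simp only [ne_eq, List.reverse_eq_nil_iff, List.map_eq_nil_iff]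
    exact hdg
  rw [reverseA_eq_reverse _ hne, htc, List.reverse_reverse]
  have hrev : pyRev (m : Int) 2 = (Nat.ofDigits 2 (Nat.digits 2 m).reverse : Nat) := by
    unfold pyRev
    have := revLoop_eq 2 (by omega) m 0
    push_cast at this ⊢
    rw [this]; ring
  rw [hrev]
  have hcast : ((Nat.ofDigits 2 (Nat.digits 2 m).reverse : Nat) : Int) = (m : Int)
      ↔ Nat.ofDigits 2 (Nat.digits 2 m).reverse = m := by exact_mod_cast Iff.rfl
  have hlt : ∀ d ∈ Nat.digits 2 m, d < 10 :=
    fun d hd => lt_of_lt_of_le (Nat.digits_lt_base (by omega) hd) (by omega)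
  rw [hcast, rev_eq_iff_palindrome 2 m (by omega) hm, ← map_palindrome_iff _ hlt]

-- ===== VERDICT (by name: the statement is the Claim_ definition above) =====
theorem doubleBasePalindromes_spec : Claim_equal_doubleBasePalindromes := by
  intro bound _
  unfold Spec_doubleBasePalindromes doubleBasePalindromes doubleBasePalindromes_alt
  refine (PySem.List.foldl_congr_mem _ _ _ _ ?_).symm
  intro acc x hx
  have hx1 : 1 ≤ x := ((PySem.List.mem_pyRange_one).1 hx).1
  have hdec := dec_cond_iff x hx1
  have hbin := bin_cond_iff x hx1
  dsimp only
  by_cases hd : PySem.Int.toChars x = reverseA (PySem.Int.toChars x)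
  · by_cases hb2 : toBinaryA x = reverseA (toBinaryA x)
    · rw [if_pos ⟨hdec.1 hd, hbin.1 hb2⟩, if_pos hd, if_pos hb2]
    · rw [if_neg (fun hc => hb2 (hbin.2 hc.2)), if_pos hd, if_neg hb2]
  · rw [if_neg (fun hc => hd (hdec.2 hc.1)), if_neg hd]
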